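-- pv_equiv track=rewrite | github.com/serdardoruk/Amazon-Online-Assessment-Python-Solutions | Questions/ZombieInMatrix.py | zombiesTrans
-- ===== SOURCE A (Python) =====
-- def zombiesTrans(grid):
-- 	rows = len(grid)
-- 	cols = len(grid[0])
--
-- 	zombies = [(i,j) for i in range(rows) for j in range(cols) if grid[i][j] == 1]
-- 	directions = [(0,1), (0,-1), (1,0), (-1,0)]
-- 	times = 0
--
-- 	while True:
-- 		new = []
--
-- 		for i, j in zombies:
-- 			for r, c in directions:
-- 				di, dj = i + r, j + c
-- 				if 0 <= di < rows and 0 <= dj < cols and grid[di][dj] == 0: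
-- 					grid[di][dj] = 1
-- 					new.append((di,dj))
-- 		zombies = new
-- 		if not zombies:
-- 			break
-- 		times += 1
--
-- 	return times
-- ===== SOURCE B (Python) =====
-- def zombiesTrans(grid):
--     rows, cols = len(grid), len(grid[0])
--     cur = [[grid[i][j] for j in range(cols)] for i in range(rows)]
--     times = 0
--     while True:
--         nxt = [[1 if cur[i][j] == 0 and any(
--                     0 <= i + r < rows and 0 <= j + c < cols and cur[i + r][j + c] == 1
--                     for r, c in ((0, 1), (0, -1), (1, 0), (-1, 0)))
--                 else cur[i][j]
--                 for j in range(cols)] for i in range(rows)]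
--         if nxt == cur:
--             return times
--         cur = nxt
--         times += 1
-- ===== Notes on version B (the rewrite author's own statement) =====
-- stated objective: alternative
-- what changed: Replaces A's frontier-list level BFS (mutating the grid in place and carrying the newly-infected cell list between rounds) by a pure cellular-automaton iteration: each round rebuilds the whole grid, infecting every 0-cell adjacent to a 1-cell, and counts rounds until the grid reaches a fixpoint.
import Mathlib
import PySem

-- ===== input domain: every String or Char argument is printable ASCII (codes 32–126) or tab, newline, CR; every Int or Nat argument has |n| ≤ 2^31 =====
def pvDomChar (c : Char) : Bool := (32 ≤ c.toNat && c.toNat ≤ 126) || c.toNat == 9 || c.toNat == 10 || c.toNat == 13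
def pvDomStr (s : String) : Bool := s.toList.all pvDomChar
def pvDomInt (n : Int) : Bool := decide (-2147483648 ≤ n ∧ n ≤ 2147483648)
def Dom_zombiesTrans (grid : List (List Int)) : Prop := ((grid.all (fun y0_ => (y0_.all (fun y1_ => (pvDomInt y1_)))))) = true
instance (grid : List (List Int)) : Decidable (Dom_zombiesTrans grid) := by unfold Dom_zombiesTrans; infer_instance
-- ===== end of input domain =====

-- B replaces A's frontier-list level BFS (which mutates the grid in place) by a pure
-- cellular-automaton iteration on a fresh copy: no mutation of the argument; equivalence
-- is about the RETURN value only (B does not perform A's in-place infection of `grid`).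

-- ===== PORT A =====
-- grid[i][j] read; inside A every access is guarded (or Pre_ excludes it), so getD is exact
def pvGetCell (g : List (List Int)) (i j : Int) : Int :=
  (g.getD i.toNat []).getD j.toNat 0

-- grid[di][dj] = 1 (only reached with 0 ≤ di < rows, 0 ≤ dj < cols, so toNat is exact)
def pvSetCell (g : List (List Int)) (i j : Int) : List (List Int) :=
  g.set i.toNat ((g.getD i.toNat []).set j.toNat 1)

def pvDirs : List (Int × Int) := [(0,1), (0,-1), (1,0), (-1,0)]

-- body of A's `for i, j in zombies:` round: inner loop over the four directions
def pvRoundA (rows cols : Int) (st : List (List Int) × List (Int × Int)) (z : Int × Int) :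
    List (List Int) × List (Int × Int) :=
  pvDirs.foldl (fun st d =>
    if 0 ≤ z.1 + d.1 ∧ z.1 + d.1 < rows ∧ 0 ≤ z.2 + d.2 ∧ z.2 + d.2 < cols ∧
        pvGetCell st.1 (z.1 + d.1) (z.2 + d.2) = 0 then
      (pvSetCell st.1 (z.1 + d.1) (z.2 + d.2), st.2 ++ [(z.1 + d.1, z.2 + d.2)])
    else st) st

-- A's `while True` loop; fuel = rows*cols+1 only makes the recursion total: every
-- non-final round infects at least one cell, so the fuel is never exhausted
def pvLoopA (rows cols : Int) : Nat → List (List Int) → List (Int × Int) → Int → Int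
  | 0, _, _, times => times
  | fuel + 1, g, zombies, times =>
    let st := zombies.foldl (pvRoundA rows cols) (g, [])
    if st.2 = [] then times else pvLoopA rows cols fuel st.1 st.2 (times + 1)

def zombiesTrans (grid : List (List Int)) : Int :=
  let rows : Int := grid.length
  let cols : Int := (grid.headD []).length
  let zombies : List (Int × Int) :=
    (List.range grid.length).flatMap (fun (i : Nat) =>
      (List.range (grid.headD []).length).filterMap (fun (j : Nat) =>
        if pvGetCell grid i j = 1 then some ((i : Int), (j : Int)) else none))
  pvLoopA rows cols (grid.length * (grid.headD []).length + 1) grid zombies 0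

-- ===== PORT B =====
-- `any(... for r,c in directions)` of Source B
def pvNbrB (rows cols : Int) (cur : List (List Int)) (i j : Int) : Bool :=
  pvDirs.any (fun d =>
    decide (0 ≤ i + d.1 ∧ i + d.1 < rows ∧ 0 ≤ j + d.2 ∧ j + d.2 < cols ∧
      pvGetCell cur (i + d.1) (j + d.2) = 1))

-- one full-grid rebuild (`nxt` comprehension of Source B)
def pvStepB (rows cols : Int) (cur : List (List Int)) : List (List Int) :=
  (List.range rows.toNat).map (fun (i : Nat) =>
    (List.range cols.toNat).map (fun (j : Nat) =>
      if pvGetCell cur (i : Int) (j : Int) = 0 ∧ pvNbrB rows cols cur (i : Int) (j : Int) = true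
      then 1 else pvGetCell cur (i : Int) (j : Int)))

-- Source B's `while True` loop; same totality-only fuel as port A
def pvLoopB (rows cols : Int) : Nat → List (List Int) → Int → Int
  | 0, _, times => times
  | fuel + 1, cur, times =>
    let nxt := pvStepB rows cols cur
    if nxt = cur then times else pvLoopB rows cols fuel nxt (times + 1)

def zombiesTrans_alt (grid : List (List Int)) : Int :=
  let rows : Int := grid.length
  let cols : Int := (grid.headD []).length
  let cur : List (List Int) :=
    (List.range rows.toNat).map (fun (i : Nat) =>
      (List.range cols.toNat).map (fun (j : Nat) => pvGetCell grid (i : Int) (j : Int)))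
  pvLoopB rows cols (rows.toNat * cols.toNat + 1) cur 0

-- ===== PRECONDITION & SPEC =====
-- Pre_ excludes exactly the inputs on which A raises IndexError: the empty grid
-- (len(grid[0])) and ragged grids with a row shorter than the first row
-- (the zombie comprehension reads grid[i][j] for every j < len(grid[0])).
def Pre_zombiesTrans (grid : List (List Int)) : Prop :=
  grid ≠ [] ∧ ∀ row ∈ grid, (grid.headD []).length ≤ row.length

instance (grid : List (List Int)) : Decidable (Pre_zombiesTrans grid) := by
  unfold Pre_zombiesTrans; infer_instance

def pvWitness_zombiesTrans : List (List Int) := [[1, 0, 0], [0, 0, 1]]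

def Spec_zombiesTrans (grid : List (List Int)) (out : Int) : Prop := out = zombiesTrans_alt grid
instance (grid : List (List Int)) (out : Int) : Decidable (Spec_zombiesTrans grid out) := by
  unfold Spec_zombiesTrans; infer_instance

-- ===== CLAIM (what is proved, stated in full; the proofs are below) =====
def Claim_equal_zombiesTrans : Prop := ∀ (grid : List (List Int)), Dom_zombiesTrans grid → Pre_zombiesTrans grid → Spec_zombiesTrans grid (zombiesTrans grid)

-- ===== LEMMAS AND PROOFS =====
def pvG (g : List (List Int)) (a b : Nat) : Int := (g.getD a []).getD b 0

theorem pvGetCell_eq (g : List (List Int)) (i j : Int) : pvGetCell g i j = pvG g i.toNat j.toNat := rfl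

def ShapeA (R C : Nat) (g : List (List Int)) : Prop := g.length = R ∧ ∀ row ∈ g, C ≤ row.length
def RectB (R C : Nat) (g : List (List Int)) : Prop := g.length = R ∧ ∀ row ∈ g, row.length = C

def pvTgts (z : Int × Int) : List (Int × Int) := pvDirs.map (fun d => (z.1 + d.1, z.2 + d.2))

def pvMStep (rows cols : Int) (st : List (List Int) × List (Int × Int)) (t : Int × Int) :
    List (List Int) × List (Int × Int) :=
  if 0 ≤ t.1 ∧ t.1 < rows ∧ 0 ≤ t.2 ∧ t.2 < cols ∧ pvGetCell st.1 t.1 t.2 = 0 then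
    (pvSetCell st.1 t.1 t.2, st.2 ++ [t]) else st

theorem roundA_eq_mstep (rows cols : Int) (st : List (List Int) × List (Int × Int)) (z : Int × Int) :
    pvRoundA rows cols st z = (pvTgts z).foldl (pvMStep rows cols) st := by
  simp [pvRoundA, pvTgts, List.foldl_map, pvMStep]

theorem foldl_roundA_eq (rows cols : Int) (zs : List (Int × Int)) (st : List (List Int) × List (Int × Int)) :
    zs.foldl (pvRoundA rows cols) st = (zs.flatMap pvTgts).foldl (pvMStep rows cols) st := by
  induction zs generalizing st with
  | nil => rfl
  | cons z zs ih => simp [List.foldl_cons, roundA_eq_mstep, List.flatMap_cons, List.foldl_append, ih]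

theorem pvGetD_set_self {α : Type} (l : List α) (i : Nat) (x d : α) (h : i < l.length) :
    (l.set i x).getD i d = x := by
  rw [List.getD_eq_getElem?_getD, List.getElem?_set_self (by simpa using h), Option.getD_some]

theorem pvGetD_set_ne {α : Type} (l : List α) (i j : Nat) (x d : α) (h : i ≠ j) :
    (l.set i x).getD j d = l.getD j d := by
  rw [List.getD_eq_getElem?_getD, List.getElem?_set_ne h, ← List.getD_eq_getElem?_getD]

theorem pvGetD_mem (g : List (List Int)) (a : Nat) (h : a < g.length) : g.getD a [] ∈ g := by
  rw [List.getD_eq_getElem?_getD, List.getElem?_eq_getElem h]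
  exact List.getElem_mem _

theorem pvG_setCell (R C : Nat) (g : List (List Int)) (hs : ShapeA R C g)
    (a b : Nat) (ha : a < R) (hb : b < C) (a' b' : Nat) :
    pvG (pvSetCell g (a : Int) (b : Int)) a' b' = if a' = a ∧ b' = b then 1 else pvG g a' b' := by
  obtain ⟨hlen, hrow⟩ := hs
  have hag : a < g.length := by omega
  have hrowlen : C ≤ (g.getD a []).length := hrow _ (pvGetD_mem g a hag)
  simp only [pvSetCell, Int.toNat_natCast, pvG]
  by_cases h1 : a' = a
  · subst h1
    rw [pvGetD_set_self _ _ _ _ hag]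
    by_cases h2 : b' = b
    · subst h2
      rw [pvGetD_set_self _ _ _ _ (by omega)]
      simp
    · rw [pvGetD_set_ne _ _ _ _ _ (fun h => h2 h.symm)]
      simp [h2]
  · rw [pvGetD_set_ne _ _ _ _ _ (fun h => h1 h.symm)]
    simp [h1]

theorem shape_setCell (R C : Nat) (g : List (List Int)) (hs : ShapeA R C g)
    (a b : Nat) (ha : a < R) : ShapeA R C (pvSetCell g (a : Int) (b : Int)) := by
  obtain ⟨hlen, hrow⟩ := hs
  refine ⟨by simp [pvSetCell, hlen], ?_⟩
  intro row hmem
  simp only [pvSetCell, Int.toNat_natCast] at hmem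
  rcases List.mem_or_eq_of_mem_set hmem with h | h
  · exact hrow _ h
  · subst h
    rw [List.length_set]
    exact hrow _ (pvGetD_mem g a (by omega))

theorem pvMStep_pos (rows cols : Int) (st : List (List Int) × List (Int × Int)) (t : Int × Int)
    (h : 0 ≤ t.1 ∧ t.1 < rows ∧ 0 ≤ t.2 ∧ t.2 < cols ∧ pvGetCell st.1 t.1 t.2 = 0) :
    pvMStep rows cols st t = (pvSetCell st.1 t.1 t.2, st.2 ++ [t]) := by
  unfold pvMStep; rw [if_pos h]

theorem pvMStep_neg (rows cols : Int) (st : List (List Int) × List (Int × Int)) (t : Int × Int)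
    (h : ¬ (0 ≤ t.1 ∧ t.1 < rows ∧ 0 ≤ t.2 ∧ t.2 < cols ∧ pvGetCell st.1 t.1 t.2 = 0)) :
    pvMStep rows cols st t = st := by
  unfold pvMStep; rw [if_neg h]

theorem mfold_acc_mono (rows cols : Int) (ts : List (Int × Int)) (g : List (List Int))
    (acc : List (Int × Int)) :
    ∃ l, (ts.foldl (pvMStep rows cols) (g, acc)).2 = acc ++ l := by
  induction ts generalizing g acc with
  | nil => exact ⟨[], by simp⟩
  | cons t ts ih =>
    rw [List.foldl_cons]
    by_cases h : 0 ≤ t.1 ∧ t.1 < rows ∧ 0 ≤ t.2 ∧ t.2 < cols ∧ pvGetCell (g, acc).1 t.1 t.2 = 0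
    · rw [pvMStep_pos rows cols (g, acc) t h]
      obtain ⟨l, hl⟩ := ih (pvSetCell g t.1 t.2) (acc ++ [t])
      exact ⟨[t] ++ l, by simp [hl]⟩
    · rw [pvMStep_neg rows cols (g, acc) t h]
      exact ih g acc

theorem mfold_char (R C : Nat) (ts : List (Int × Int)) (g : List (List Int))
    (acc : List (Int × Int)) (hs : ShapeA R C g) :
    ShapeA R C (ts.foldl (pvMStep (R : Int) (C : Int)) (g, acc)).1 ∧
    (∀ a b : Nat, pvG (ts.foldl (pvMStep (R : Int) (C : Int)) (g, acc)).1 a b =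
        if a < R ∧ b < C ∧ pvG g a b = 0 ∧ ((a : Int), (b : Int)) ∈ ts then 1 else pvG g a b) ∧
    (∀ c ∈ (ts.foldl (pvMStep (R : Int) (C : Int)) (g, acc)).2, c ∈ acc ∨
        ∃ a b : Nat, c = ((a : Int), (b : Int)) ∧ a < R ∧ b < C ∧ pvG g a b = 0 ∧ c ∈ ts) ∧
    (∀ a b : Nat, a < R → b < C → pvG g a b = 0 → ((a : Int), (b : Int)) ∈ ts →
        ((a : Int), (b : Int)) ∈ (ts.foldl (pvMStep (R : Int) (C : Int)) (g, acc)).2) ∧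
    ((∀ a b : Nat, a < R → b < C → pvG g a b = 0 → ((a : Int), (b : Int)) ∉ ts) →
        ts.foldl (pvMStep (R : Int) (C : Int)) (g, acc) = (g, acc)) := by
  induction ts generalizing g acc with
  | nil => exact ⟨hs, by simp, by simp, by simp, fun _ => rfl⟩
  | cons t ts ih =>
    rw [List.foldl_cons]
    by_cases hg : 0 ≤ t.1 ∧ t.1 < (R : Int) ∧ 0 ≤ t.2 ∧ t.2 < (C : Int) ∧
        pvGetCell (g, acc).1 t.1 t.2 = 0
    · rw [pvMStep_pos _ _ (g, acc) t hg]
      -- guard true: t in window, cell 0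
      obtain ⟨ht1, ht2, ht3, ht4, ht0⟩ := hg
      set a₀ := t.1.toNat with ha₀
      set b₀ := t.2.toNat with hb₀
      have hta : t.1 = (a₀ : Int) := (Int.toNat_of_nonneg ht1).symm
      have htb : t.2 = (b₀ : Int) := (Int.toNat_of_nonneg ht3).symm
      have ha₀R : a₀ < R := by omega
      have hb₀C : b₀ < C := by omega
      have ht : t = ((a₀ : Int), (b₀ : Int)) := Prod.ext hta htb
      have h0 : pvG g a₀ b₀ = 0 := by rw [pvGetCell_eq] at ht0; exact ht0
      have hsetg : pvSetCell g t.1 t.2 = pvSetCell g (a₀ : Int) (b₀ : Int) := by rw [hta, htb]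
      have hs1 : ShapeA R C (pvSetCell g t.1 t.2) := by
        rw [hsetg]; exact shape_setCell R C g hs a₀ b₀ ha₀R
      have hG1 : ∀ a b : Nat, pvG (pvSetCell g t.1 t.2) a b =
          if a = a₀ ∧ b = b₀ then 1 else pvG g a b := by
        intro a b; rw [hsetg]; exact pvG_setCell R C g hs a₀ b₀ ha₀R hb₀C a b
      obtain ⟨IH1, IH2, IH3, IH4, IH5⟩ := ih (pvSetCell g t.1 t.2) (acc ++ [t]) hs1
      refine ⟨IH1, ?_, ?_, ?_, ?_⟩
      · intro a b
        rw [IH2 a b, hG1 a b]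
        by_cases hab : a = a₀ ∧ b = b₀
        · obtain ⟨rfl, rfl⟩ := hab

          have : ¬ ((1 : Int) = 0) := by norm_num
          simp [this, ha₀R, hb₀C, h0, ht]
        · rw [if_neg hab]
          have hne : ((a : Int), (b : Int)) ≠ t := by
            rw [ht]; intro hcc
            exact hab ⟨Nat.cast_injective (congrArg Prod.fst hcc),
              Nat.cast_injective (congrArg Prod.snd hcc)⟩
          simp [List.mem_cons, hne]
      · intro c hc
        rcases IH3 c hc with hacc | ⟨a, b, rfl, haR, hbC, h0', hmem⟩
        · rcases List.mem_append.mp hacc with h | h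
          · exact Or.inl h
          · simp only [List.mem_singleton] at h
            subst h
            exact Or.inr ⟨a₀, b₀, ht, ha₀R, hb₀C, h0, by simp [ht]⟩
        · rw [hG1 a b] at h0'
          split_ifs at h0' with hab
          · norm_num at h0'
          · exact Or.inr ⟨a, b, rfl, haR, hbC, h0', List.mem_cons_of_mem _ hmem⟩
      · intro a b haR hbC h0' hmem
        by_cases hct : ((a : Int), (b : Int)) = t
        · obtain ⟨l, hl⟩ := mfold_acc_mono (R : Int) (C : Int) ts (pvSetCell g t.1 t.2) (acc ++ [t])
          rw [hl]
          simp [hct]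
        · rcases List.mem_cons.mp hmem with h | h
          · exact absurd h hct
          · refine IH4 a b haR hbC ?_ h
            rw [hG1 a b, if_neg ?_]
            · exact h0'
            · rintro ⟨rfl, rfl⟩
              exact hct ht.symm
      · intro hnone
        exfalso
        exact hnone a₀ b₀ ha₀R hb₀C h0 (by simp [ht])
    · rw [pvMStep_neg _ _ (g, acc) t hg]
      -- guard false at t
      obtain ⟨IH1, IH2, IH3, IH4, IH5⟩ := ih g acc hs
      have htno : ∀ a b : Nat, a < R → b < C → pvG g a b = 0 → ((a : Int), (b : Int)) ≠ t := by
        rintro a b haR hbC h0 rfl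
        exact hg ⟨Int.natCast_nonneg a, by show (a : Int) < (R : Int); exact_mod_cast haR,
          Int.natCast_nonneg b, by show (b : Int) < (C : Int); exact_mod_cast hbC,
          by show pvGetCell g (a : Int) (b : Int) = 0; rw [pvGetCell_eq]; simpa using h0⟩
      refine ⟨IH1, ?_, ?_, ?_, ?_⟩
      · intro a b
        rw [IH2 a b]
        by_cases hcond : a < R ∧ b < C ∧ pvG g a b = 0
        · obtain ⟨h1, h2, h3⟩ := hcond
          have := htno a b h1 h2 h3
          simp [List.mem_cons, this, h1, h2, h3]
        · have hx : ¬ (a < R ∧ b < C ∧ pvG g a b = 0 ∧ ((a:Int),(b:Int)) ∈ ts) := by tauto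
          have hy : ¬ (a < R ∧ b < C ∧ pvG g a b = 0 ∧ ((a:Int),(b:Int)) ∈ t :: ts) := by tauto
          rw [if_neg hx, if_neg hy]
      · intro c hc
        rcases IH3 c hc with h | ⟨a, b, rfl, haR, hbC, h0', hmem⟩
        · exact Or.inl h
        · exact Or.inr ⟨a, b, rfl, haR, hbC, h0', List.mem_cons_of_mem _ hmem⟩
      · intro a b haR hbC h0' hmem
        rcases List.mem_cons.mp hmem with h | h
        · exact absurd h (htno a b haR hbC h0')
        · exact IH4 a b haR hbC h0' h
      · intro hnone
        exact IH5 (fun a b h1 h2 h3 => fun hmem => hnone a b h1 h2 h3 (List.mem_cons_of_mem _ hmem))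
def AdjP (u w : Int × Int) : Prop := ∃ d ∈ pvDirs, w = (u.1 + d.1, u.2 + d.2)

theorem mem_pvTgts (z w : Int × Int) : w ∈ pvTgts z ↔ AdjP z w := by
  simp [pvTgts, AdjP, eq_comm]

theorem adjP_iff (u w : Int × Int) : AdjP u w ↔
    (w.1 = u.1 ∧ (w.2 = u.2 + 1 ∨ w.2 = u.2 - 1)) ∨
    (w.2 = u.2 ∧ (w.1 = u.1 + 1 ∨ w.1 = u.1 - 1)) := by
  constructor
  · rintro ⟨d, hd, rfl⟩
    fin_cases hd <;> simp <;> omega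
  · intro h
    rcases h with ⟨h1, h2 | h2⟩ | ⟨h1, h2 | h2⟩
    · exact ⟨(0, 1), by simp [pvDirs], by ext <;> simp <;> omega⟩
    · exact ⟨(0, -1), by simp [pvDirs], by ext <;> simp <;> omega⟩
    · exact ⟨(1, 0), by simp [pvDirs], by ext <;> simp <;> omega⟩
    · exact ⟨(-1, 0), by simp [pvDirs], by ext <;> simp <;> omega⟩

theorem adjP_symm (u w : Int × Int) (h : AdjP u w) : AdjP w u := by
  rw [adjP_iff] at h ⊢
  omega

theorem mem_flat_tgts (zs : List (Int × Int)) (c : Int × Int) :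
    c ∈ zs.flatMap pvTgts ↔ ∃ z ∈ zs, AdjP z c := by
  simp [List.mem_flatMap, mem_pvTgts]

theorem nbrB_iff (R C : Nat) (cur : List (List Int)) (i j : Int) :
    pvNbrB (R : Int) (C : Int) cur i j = true ↔
    ∃ u : Int × Int, AdjP (i, j) u ∧ 0 ≤ u.1 ∧ u.1 < (R : Int) ∧ 0 ≤ u.2 ∧ u.2 < (C : Int) ∧
      pvGetCell cur u.1 u.2 = 1 := by
  simp only [pvNbrB, List.any_eq_true, decide_eq_true_eq]
  constructor
  · rintro ⟨d, hd, h1, h2, h3, h4, h5⟩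
    exact ⟨(i + d.1, j + d.2), ⟨d, hd, rfl⟩, h1, h2, h3, h4, h5⟩
  · rintro ⟨u, ⟨d, hd, rfl⟩, h1, h2, h3, h4, h5⟩
    exact ⟨d, hd, h1, h2, h3, h4, h5⟩

theorem pvG_tab (R C : Nat) (f : Nat → Nat → Int) (a b : Nat) (ha : a < R) (hb : b < C) :
    pvG ((List.range R).map (fun (i : Nat) => (List.range C).map (fun (j : Nat) => f i j))) a b = f a b := by
  unfold pvG
  simp only [List.getD_eq_getElem?_getD]
  rw [List.getElem?_map, List.getElem?_range ha]
  simp only [Option.map_some, Option.getD_some]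
  rw [List.getElem?_map, List.getElem?_range hb]
  simp

theorem rect_tab (R C : Nat) (f : Nat → Nat → Int) :
    RectB R C ((List.range R).map (fun (i : Nat) => (List.range C).map (fun (j : Nat) => f i j))) := by
  refine ⟨by simp, ?_⟩
  intro row hrow
  simp only [List.mem_map, List.mem_range] at hrow
  obtain ⟨i, _, rfl⟩ := hrow
  simp

theorem stepB_tab (R C : Nat) (cur : List (List Int)) :
    pvStepB (R : Int) (C : Int) cur = (List.range R).map (fun (i : Nat) => (List.range C).map (fun (j : Nat) =>
      if pvGetCell cur (i : Int) (j : Int) = 0 ∧ pvNbrB (R : Int) (C : Int) cur (i : Int) (j : Int) = true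
      then 1 else pvGetCell cur (i : Int) (j : Int))) := by
  unfold pvStepB
  simp [Int.toNat_natCast]

theorem pvG_eq_getElem (g : List (List Int)) (a b : Nat) (ha : a < g.length)
    (hb : b < (g[a]'ha).length) : pvG g a b = (g[a]'ha)[b]'hb := by
  unfold pvG
  simp only [List.getD_eq_getElem?_getD]
  rw [List.getElem?_eq_getElem ha, Option.getD_some, List.getElem?_eq_getElem hb, Option.getD_some]

theorem stepB_fix_iff (R C : Nat) (cur : List (List Int)) (hr : RectB R C cur) :
    pvStepB (R : Int) (C : Int) cur = cur ↔
    ∀ a b : Nat, a < R → b < C →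
      ¬ (pvGetCell cur (a : Int) (b : Int) = 0 ∧ pvNbrB (R : Int) (C : Int) cur (a : Int) (b : Int) = true) := by
  obtain ⟨hlen, hrow⟩ := hr
  constructor
  · intro heq a b ha hb hcon
    have h1 : pvG (pvStepB (R : Int) (C : Int) cur) a b = pvG cur a b := by rw [heq]
    rw [stepB_tab, pvG_tab R C _ a b ha hb, if_pos hcon] at h1
    rw [pvGetCell_eq, Int.toNat_natCast, Int.toNat_natCast] at hcon
    rw [← h1] at hcon
    norm_num at hcon
  · intro hno
    rw [stepB_tab]
    apply List.ext_getElem (by simp [hlen])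
    intro a ha1 ha2
    rw [List.getElem_map, List.getElem_range]
    have haR : a < R := by simpa using ha1
    have hrowa : (cur[a]'ha2).length = C := hrow _ (List.getElem_mem _)
    apply List.ext_getElem (by simp [hrowa])
    intro b hb1 hb2
    rw [List.getElem_map, List.getElem_range]
    rw [if_neg (hno a b haR (by simpa [hrowa] using hb2))]
    rw [pvGetCell_eq, Int.toNat_natCast, Int.toNat_natCast]
    exact pvG_eq_getElem cur a b ha2 hb2
def ZRel (R C : Nat) (gA : List (List Int)) (zs : List (Int × Int)) (cur : List (List Int)) : Prop :=
  ShapeA R C gA ∧ RectB R C cur ∧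
  (∀ a b : Nat, a < R → b < C → pvG gA a b = pvG cur a b) ∧
  (∀ z ∈ zs, 0 ≤ z.1 ∧ z.1 < (R : Int) ∧ 0 ≤ z.2 ∧ z.2 < (C : Int) ∧
    pvG gA z.1.toNat z.2.toNat = 1) ∧
  (∀ a b : Nat, a < R → b < C → pvG gA a b = 0 →
    (∃ u : Int × Int, AdjP ((a : Int), (b : Int)) u ∧ 0 ≤ u.1 ∧ u.1 < (R : Int) ∧ 0 ≤ u.2 ∧
      u.2 < (C : Int) ∧ pvG gA u.1.toNat u.2.toNat = 1) →
    ∃ z ∈ zs, AdjP z ((a : Int), (b : Int)))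

theorem step_sim (R C : Nat) (gA cur : List (List Int)) (zs : List (Int × Int))
    (h : ZRel R C gA zs cur) :
    ((zs.foldl (pvRoundA (R : Int) (C : Int)) (gA, [])).2 = [] ↔
      pvStepB (R : Int) (C : Int) cur = cur) ∧
    ZRel R C (zs.foldl (pvRoundA (R : Int) (C : Int)) (gA, [])).1
      (zs.foldl (pvRoundA (R : Int) (C : Int)) (gA, [])).2
      (pvStepB (R : Int) (C : Int) cur) := by
  obtain ⟨hsA, hrB, hpt, hzok, hcov⟩ := h
  rw [foldl_roundA_eq]
  set flat := zs.flatMap pvTgts with hflat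
  obtain ⟨M1, M2, M3, M4, M5⟩ := mfold_char R C flat gA [] hsA
  -- key: for a 0-cell of the window, membership in the target list ↔ B's neighbour test
  have key : ∀ a b : Nat, a < R → b < C → pvG gA a b = 0 →
      (((a : Int), (b : Int)) ∈ flat ↔
        pvNbrB (R : Int) (C : Int) cur (a : Int) (b : Int) = true) := by
    intro a b ha hb h0
    rw [hflat, mem_flat_tgts, nbrB_iff]
    constructor
    · rintro ⟨z, hz, hadj⟩
      obtain ⟨hz1, hz2, hz3, hz4, hz5⟩ := hzok z hz
      refine ⟨z, adjP_symm _ _ hadj, hz1, hz2, hz3, hz4, ?_⟩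
      rw [pvGetCell_eq, ← hpt z.1.toNat z.2.toNat (by omega) (by omega)]
      exact hz5
    · rintro ⟨u, hadj, hu1, hu2, hu3, hu4, hu5⟩
      refine hcov a b ha hb h0 ⟨u, hadj, hu1, hu2, hu3, hu4, ?_⟩
      rw [hpt u.1.toNat u.2.toNat (by omega) (by omega)]
      rw [pvGetCell_eq] at hu5
      exact hu5
  have hptcell : ∀ a b : Nat, a < R → b < C →
      pvGetCell cur (a : Int) (b : Int) = pvG gA a b := by
    intro a b ha hb
    rw [pvGetCell_eq, Int.toNat_natCast, Int.toNat_natCast, hpt a b ha hb]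
  constructor
  · -- emptiness ↔ fixpoint
    rw [stepB_fix_iff R C cur hrB]
    constructor
    · intro hempty a b ha hb ⟨hc0, hcn⟩
      have h0 : pvG gA a b = 0 := by rw [← hptcell a b ha hb]; exact hc0
      have hmem : ((a : Int), (b : Int)) ∈ flat := (key a b ha hb h0).mpr hcn
      have := M4 a b ha hb h0 hmem
      rw [hempty] at this
      exact absurd this (List.not_mem_nil)
    · intro hno
      have : flat.foldl (pvMStep (R : Int) (C : Int)) (gA, []) = (gA, []) := by
        apply M5
        intro a b ha hb h0 hmem
        exact hno a b ha hb ⟨by rw [hptcell a b ha hb]; exact h0, (key a b ha hb h0).mp hmem⟩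
      rw [this]
  · refine ⟨M1, by rw [stepB_tab]; exact rect_tab R C _, ?_, ?_, ?_⟩
    · -- pointwise
      intro a b ha hb
      rw [M2 a b, stepB_tab, pvG_tab R C _ a b ha hb, hptcell a b ha hb]
      by_cases h0 : pvG gA a b = 0
      · by_cases hmem : ((a : Int), (b : Int)) ∈ flat
        · rw [if_pos ⟨ha, hb, h0, hmem⟩, if_pos ⟨h0, (key a b ha hb h0).mp hmem⟩]
        · rw [if_neg (by tauto), if_neg (by
            rintro ⟨_, hcn⟩
            exact hmem ((key a b ha hb h0).mpr hcn))]
      · rw [if_neg (by tauto), if_neg (by tauto)]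
    · -- new zombies are in-window 1-cells of the new grid
      intro c hc
      rcases M3 c hc with habs | ⟨a, b, rfl, ha, hb, h0, hmem⟩
      · exact absurd habs (List.not_mem_nil)
      · refine ⟨Int.natCast_nonneg a, by show (a : Int) < (R : Int); exact_mod_cast ha,
          Int.natCast_nonneg b, by show (b : Int) < (C : Int); exact_mod_cast hb, ?_⟩
        simp only [Int.toNat_natCast]
        rw [M2 a b, if_pos ⟨ha, hb, h0, hmem⟩]
    · -- cover for the new state
      intro a b ha hb h0' ⟨u, hadj, hu1, hu2, hu3, hu4, hu5⟩
      have h0 : pvG gA a b = 0 := by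
        have := M2 a b
        rw [h0'] at this
        split_ifs at this with hcnd
        · norm_num at this
        · exact this.symm
      have hnomem : ((a : Int), (b : Int)) ∉ flat := by
        intro hmem
        have := M2 a b
        rw [h0', if_pos ⟨ha, hb, h0, hmem⟩] at this
        norm_num at this
      set i := u.1.toNat with hi
      set j := u.2.toNat with hj
      have hu : u = ((i : Int), (j : Int)) :=
        Prod.ext (Int.toNat_of_nonneg hu1).symm (Int.toNat_of_nonneg hu3).symm
      have hiR : i < R := by omega
      have hjC : j < C := by omega
      by_cases hgu : pvG gA i j = 0
      · have hmemu : ((i : Int), (j : Int)) ∈ flat := by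
          have h1 := M2 i j
          rw [hu5] at h1
          by_contra hno
          rw [if_neg (by tauto), hgu] at h1
          norm_num at h1
        refine ⟨((i : Int), (j : Int)), M4 i j hiR hjC hgu hmemu, ?_⟩
        rw [← hu]
        exact adjP_symm _ _ hadj
      · -- u was already 1 in gA: old cover contradicts hnomem
        exfalso
        have hone : pvG gA i j = 1 := by
          have h1 := M2 i j
          rw [hu5, if_neg (by tauto)] at h1
          exact h1.symm
        have := hcov a b ha hb h0 ⟨u, hadj, hu1, hu2, hu3, hu4, by rw [← hi, ← hj]; exact hone⟩
        rw [hflat] at hnomem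
        rw [mem_flat_tgts] at hnomem
        exact hnomem this

theorem loop_sim (R C : Nat) (fuel : Nat) :
    ∀ (gA cur : List (List Int)) (zs : List (Int × Int)) (times : Int),
    ZRel R C gA zs cur →
    pvLoopA (R : Int) (C : Int) fuel gA zs times = pvLoopB (R : Int) (C : Int) fuel cur times := by
  induction fuel with
  | zero => intro gA cur zs times _; rfl
  | succ fuel ih =>
    intro gA cur zs times hrel
    obtain ⟨hiff, hrel'⟩ := step_sim R C gA cur zs hrel
    show (let st := zs.foldl (pvRoundA (R : Int) (C : Int)) (gA, []);
      if st.2 = [] then times else pvLoopA (R : Int) (C : Int) fuel st.1 st.2 (times + 1)) =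
      (let nxt := pvStepB (R : Int) (C : Int) cur;
      if nxt = cur then times else pvLoopB (R : Int) (C : Int) fuel nxt (times + 1))
    by_cases hdone : (zs.foldl (pvRoundA (R : Int) (C : Int)) (gA, [])).2 = []
    · simp only [hdone, hiff.mp hdone]
      simp
    · simp only [if_neg hdone, if_neg (fun hfix => hdone (hiff.mpr hfix))]
      exact ih _ _ _ _ hrel'
theorem mem_zombies0 (grid : List (List Int)) (c : Int × Int) :
    c ∈ (List.range grid.length).flatMap (fun (i : Nat) =>
      (List.range (grid.headD []).length).filterMap (fun (j : Nat) =>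
        if pvGetCell grid i j = 1 then some ((i : Int), (j : Int)) else none)) ↔
    ∃ a b : Nat, a < grid.length ∧ b < (grid.headD []).length ∧ c = ((a : Int), (b : Int)) ∧
      pvG grid a b = 1 := by
  simp only [List.mem_flatMap, List.mem_filterMap, List.mem_range]
  constructor
  · rintro ⟨i, hi, j, hj, hij⟩
    by_cases h1 : pvGetCell grid (i : Int) (j : Int) = 1
    · rw [if_pos h1, Option.some_inj] at hij
      refine ⟨i, j, hi, hj, hij.symm, ?_⟩
      rw [pvGetCell_eq, Int.toNat_natCast, Int.toNat_natCast] at h1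
      exact h1
    · rw [if_neg h1] at hij
      cases hij
  · rintro ⟨a, b, ha, hb, rfl, h1⟩
    refine ⟨a, ha, b, hb, ?_⟩
    rw [if_pos (by rw [pvGetCell_eq, Int.toNat_natCast, Int.toNat_natCast]; exact h1)]

theorem zrel_init (grid : List (List Int))
    (hrows : ∀ row ∈ grid, (grid.headD []).length ≤ row.length) :
    ZRel grid.length (grid.headD []).length grid
      ((List.range grid.length).flatMap (fun (i : Nat) =>
        (List.range (grid.headD []).length).filterMap (fun (j : Nat) =>
          if pvGetCell grid i j = 1 then some ((i : Int), (j : Int)) else none)))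
      ((List.range grid.length).map (fun (i : Nat) =>
        (List.range (grid.headD []).length).map (fun (j : Nat) =>
          pvGetCell grid (i : Int) (j : Int)))) := by
  set R := grid.length with hR
  set C := (grid.headD []).length with hC
  refine ⟨⟨rfl, hrows⟩, rect_tab R C _, ?_, ?_, ?_⟩
  · intro a b ha hb
    rw [pvG_tab R C _ a b ha hb, pvGetCell_eq, Int.toNat_natCast, Int.toNat_natCast]
  · intro z hz
    rw [mem_zombies0 grid z] at hz
    obtain ⟨a, b, ha, hb, rfl, h1⟩ := hz
    exact ⟨Int.natCast_nonneg a, by show (a : Int) < (R : Int); exact_mod_cast ha,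
      Int.natCast_nonneg b, by show (b : Int) < (C : Int); exact_mod_cast hb,
      by simpa [Int.toNat_natCast] using h1⟩
  · intro a b ha hb h0 ⟨u, hadj, hu1, hu2, hu3, hu4, hu5⟩
    have hu : u = ((u.1.toNat : Int), (u.2.toNat : Int)) :=
      Prod.ext (Int.toNat_of_nonneg hu1).symm (Int.toNat_of_nonneg hu3).symm
    refine ⟨((u.1.toNat : Int), (u.2.toNat : Int)), ?_, ?_⟩
    · rw [mem_zombies0 grid]
      exact ⟨u.1.toNat, u.2.toNat, by omega, by omega, rfl, hu5⟩
    · rw [← hu]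
      exact adjP_symm _ _ hadj

-- ===== VERDICT (by name: the statement is the Claim_ definition above) =====
theorem zombiesTrans_spec : Claim_equal_zombiesTrans := by
  unfold Claim_equal_zombiesTrans Spec_zombiesTrans
  intro grid _ hpre
  obtain ⟨hne, hrows⟩ := hpre
  unfold zombiesTrans zombiesTrans_alt
  simp only [Int.toNat_natCast]
  exact loop_sim grid.length (grid.headD []).length
    (grid.length * (grid.headD []).length + 1) grid _ _ 0 (zrel_init grid hrows)
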